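-- pv_equiv track=rewrite | github.com/LilyHuangUIUC/mp2 | WordSudoku.py | MatchDegree
-- ===== SOURCE A (Python) =====
-- def MatchDegree(array,word): # compare a section of the grid and the word. Count # of the same letters
-- 	match = 9
-- 	for i in range(len(array)):
-- 		if array[i] == word[i]:
-- 			match -= 1
-- 		if not array[i] == word[i]:
-- 			if not array[i] =='_':
-- 				return -1
-- 	return match
-- ===== SOURCE B (Python) =====
-- def MatchDegree(array, word):
--     # pass 1: scan in order for a conflicting (non-'_', non-matching) cell
--     for i in range(len(array)):
--         if array[i] != word[i] and array[i] != '_':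
--             return -1
--     # pass 2: no conflict -> 9 minus the number of exact matches
--     return 9 - sum(1 for i in range(len(array)) if array[i] == word[i])
-- ===== Notes on version B (the rewrite author's own statement) =====
-- stated objective: simpler
-- what changed: Replaces A's single fused loop carrying a running counter with two separate passes: an ordered guard scan that returns -1 on the first conflicting cell, then 9 minus a count of exact matches.
import Mathlib
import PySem

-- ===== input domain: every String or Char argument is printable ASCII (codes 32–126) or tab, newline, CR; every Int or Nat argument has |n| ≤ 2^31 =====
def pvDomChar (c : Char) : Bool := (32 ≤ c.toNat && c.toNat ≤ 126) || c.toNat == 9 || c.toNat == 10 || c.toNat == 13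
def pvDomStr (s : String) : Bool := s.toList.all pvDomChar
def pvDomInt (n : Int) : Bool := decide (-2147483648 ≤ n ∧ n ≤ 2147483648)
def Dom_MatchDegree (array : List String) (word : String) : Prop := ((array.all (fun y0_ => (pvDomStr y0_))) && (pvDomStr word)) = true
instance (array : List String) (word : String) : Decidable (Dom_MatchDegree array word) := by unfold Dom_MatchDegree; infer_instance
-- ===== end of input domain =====

-- B is a simpler two-pass decomposition of A's fused loop: a guard scan for a conflict, then 9 minus a match count.
-- A raises IndexError when word is shorter than array and no conflict occurs before the end of word; Pre_ excludes exactly those inputs (B raises identically there).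

-- ===== PORT A =====
-- the single fused loop of A, carrying the running `match` counter
def pvLoopA (array : List String) (word : String) (i : Nat) (m : Int) : Int :=
  if h : i < array.length then
    match PySem.Str.pyGet? word (i : Int) with
    | none => 0   -- IndexError in Python; excluded by Pre_MatchDegree
    | some c =>
      let m' := if array[i] = String.singleton c then m - 1 else m
      if ¬ array[i] = String.singleton c ∧ ¬ array[i] = "_" then -1
      else pvLoopA array word (i + 1) m'
  else m
termination_by array.length - i

def MatchDegree (array : List String) (word : String) : Int :=
  pvLoopA array word 0 9

-- ===== PORT B =====
-- pass 1: ordered scan for the first conflicting cell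
def pvGuardB (array : List String) (word : String) (i : Nat) : Option Int :=
  if h : i < array.length then
    match PySem.Str.pyGet? word (i : Int) with
    | none => some 0   -- IndexError in Python B too; excluded by Pre_MatchDegree
    | some c =>
      if ¬ array[i] = String.singleton c ∧ ¬ array[i] = "_" then some (-1)
      else pvGuardB array word (i + 1)
  else none
termination_by array.length - i

-- pass 2: sum(1 for i in range(len(array)) if array[i] == word[i])
def pvCountB (array : List String) (word : String) (i : Nat) : Int :=
  if h : i < array.length then
    (match PySem.Str.pyGet? word (i : Int) with
     | none => 0   -- unreachable when pass 1 found no conflict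
     | some c => if array[i] = String.singleton c then 1 else 0)
    + pvCountB array word (i + 1)
  else 0
termination_by array.length - i

def MatchDegree_alt (array : List String) (word : String) : Int :=
  match pvGuardB array word 0 with
  | some r => r
  | none => 9 - pvCountB array word 0

-- ===== PRECONDITION & SPEC =====
-- Pre_ excludes exactly the inputs where Python A raises IndexError: word shorter than
-- array with no conflicting cell within word's length.
def Pre_MatchDegree (array : List String) (word : String) : Prop :=
  word.toList.length < array.length →
    ∃ j, j < word.toList.length ∧ j < array.length ∧
      ¬ array[j]! = String.singleton (word.toList[j]!) ∧ ¬ array[j]! = "_"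
instance (array : List String) (word : String) : Decidable (Pre_MatchDegree array word) := by
  unfold Pre_MatchDegree; infer_instance

def pvWitness_MatchDegree : List String × String := (["a", "_", "b"], "abc")

def Spec_MatchDegree (array : List String) (word : String) (out : Int) : Prop := out = MatchDegree_alt array word
instance (array : List String) (word : String) (out : Int) : Decidable (Spec_MatchDegree array word out) := by unfold Spec_MatchDegree; infer_instance

-- ===== CLAIM (what is proved, stated in full; the proofs are below) =====
def Claim_equal_MatchDegree : Prop := ∀ (array : List String) (word : String), Dom_MatchDegree array word → Pre_MatchDegree array word → Spec_MatchDegree array word (MatchDegree array word)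

-- ===== LEMMAS AND PROOFS =====
-- Loop correspondence: the fused loop of A equals B's guard pass followed by the count pass.
theorem pvLoopA_eq (array : List String) (word : String) :
    ∀ i m, pvLoopA array word i m =
      match pvGuardB array word i with
      | some r => r
      | none => m - pvCountB array word i := by
  have key : ∀ n i m, array.length - i ≤ n → pvLoopA array word i m =
      (match pvGuardB array word i with
       | some r => r
       | none => m - pvCountB array word i) := by
    intro n
    induction n with
    | zero =>
      intro i m h
      have hi : ¬ i < array.length := by omega
      rw [pvLoopA, pvGuardB, pvCountB]
      simp [hi]
    | succ n ih =>
      intro i m h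
      rw [pvLoopA, pvGuardB, pvCountB]
      by_cases hi : i < array.length
      · simp only [hi, dif_pos]
        cases hg : PySem.Str.pyGet? word (i : Int) with
        | none => simp
        | some c =>
          by_cases hc : ¬ array[i] = String.singleton c ∧ ¬ array[i] = "_"
          · simp [hc]
          · simp only [hc, if_neg, not_false_iff]
            rw [ih (i + 1) _ (by omega)]
            cases pvGuardB array word (i + 1) with
            | some r => simp
            | none =>
              by_cases hm : array[i] = String.singleton c
              · simp only [hm, if_pos, if_true]
                ring
              · simp only [hm, if_neg, not_false_iff, if_false]
                ring
      · simp [hi]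
  intro i m
  exact key (array.length - i) i m le_rfl

theorem MatchDegree_spec : Claim_equal_MatchDegree := by
  intro array word _ _
  unfold Spec_MatchDegree MatchDegree MatchDegree_alt
  rw [pvLoopA_eq]
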